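-- pv_equiv track=rewrite | github.com/kerighan/dikt | dikt/__init__.py | hashkey
-- ===== SOURCE A (Python) =====
-- def hashkey(text, num_chunks):
--     if not isinstance(text, str):
--         text = str(text)
--
--     hashsum = 0
--     text_len = len(text)
--     for i, c in enumerate(text, 1):
--         ord_c = ord(c)
--         hashsum += (text_len + i) ** ord_c + ord_c
--     hashsum = hashsum % num_chunks
--     return hashsum
-- ===== SOURCE B (Python) =====
-- def hashkey(text, num_chunks):
--     if not isinstance(text, str):
--         text = str(text)
--     n = len(text)
--     # Pass 1: bucket the positions.  A term (n+i)**ord(c) mod m depends only on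
--     # ((n+i) % m, ord(c)), so count how often each such pair occurs (and sum the
--     # ord(c) addends on the way).
--     counts = {}
--     ord_total = 0
--     for i, c in enumerate(text, 1):
--         key = ((n + i) % num_chunks, ord(c))
--         counts[key] = counts.get(key, 0) + 1
--         ord_total += ord(c)
--     # Pass 2: one modular exponentiation per DISTINCT (residue, char-code) pair.
--     pow_total = 0
--     for (r, o), cnt in counts.items():
--         pow_total += cnt * pow(r, o, num_chunks)
--     return (pow_total + ord_total) % num_chunks
-- ===== Notes on version B (the rewrite author's own statement) =====
-- stated objective: faster
-- what changed: Instead of summing huge exact bignum powers and taking one final %, B first groups positions into a counter keyed by ((len+i) % num_chunks, ord(c)) -- the only data a term depends on mod num_chunks -- and then performs ONE modular exponentiation per distinct (residue, code) pair, weighting it by its multiplicity; no big integer is ever built and repeated pow work disappears.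
import Mathlib
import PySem

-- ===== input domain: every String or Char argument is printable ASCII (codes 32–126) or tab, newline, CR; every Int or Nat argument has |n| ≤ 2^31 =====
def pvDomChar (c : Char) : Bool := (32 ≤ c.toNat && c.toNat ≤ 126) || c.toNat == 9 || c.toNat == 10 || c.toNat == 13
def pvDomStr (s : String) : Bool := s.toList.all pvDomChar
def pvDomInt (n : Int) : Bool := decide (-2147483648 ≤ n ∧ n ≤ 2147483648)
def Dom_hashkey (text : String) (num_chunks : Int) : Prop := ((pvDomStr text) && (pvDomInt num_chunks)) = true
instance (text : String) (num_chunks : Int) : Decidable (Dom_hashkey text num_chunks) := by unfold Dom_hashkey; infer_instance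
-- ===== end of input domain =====

-- B replaces the huge-bignum sum by a two-phase algorithm: a counter over ((len+i) % m, ord(c))
-- pairs built in one pass, then one modular exponentiation per DISTINCT pair; return values equal.

-- ===== PORT A =====
-- literal port of A: sum (text_len + i) ** ord(c) + ord(c) over enumerate(text, 1), then one final % num_chunks
def hashkey (text : String) (num_chunks : Int) : Int :=
  let textLen : Int := PySem.Str.len text
  let hashsum : Int :=
    (PySem.List.enumerate text.toList 1).foldl
      (fun hashsum p => hashsum + (textLen + p.1) ^ p.2.toNat + (p.2.toNat : Int)) 0
  PySem.Int.mod hashsum num_chunks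

-- ===== PORT B =====
-- literal port of B: pass 1 builds counts[( (n+i)%m, ord(c) )] += 1 and ord_total;
-- pass 2 sums cnt * pow(r, o, m) over the counter's items; then one final % m.
def hashkey_alt (text : String) (num_chunks : Int) : Int :=
  let n : Int := PySem.Str.len text
  let st :=
    (PySem.List.enumerate text.toList 1).foldl
      (fun (st : PySem.Dict (Int × Int) Int × Int) p =>
        (st.1.insert (PySem.Int.mod (n + p.1) num_chunks, (p.2.toNat : Int))
            (st.1.getD (PySem.Int.mod (n + p.1) num_chunks, (p.2.toNat : Int)) 0 + 1),
         st.2 + (p.2.toNat : Int)))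
      (PySem.Dict.empty, 0)
  let powTotal :=
    st.1.items.foldl
      (fun s it => s + it.2 * PySem.Int.powMod it.1.1 it.1.2.toNat num_chunks) 0
  PySem.Int.mod (powTotal + st.2) num_chunks

-- ===== PRECONDITION & SPEC =====
-- Pre_ excludes num_chunks = 0, where the Python A raises ZeroDivisionError (B raises there too).
def Pre_hashkey (text : String) (num_chunks : Int) : Prop := num_chunks ≠ 0
instance (text : String) (num_chunks : Int) : Decidable (Pre_hashkey text num_chunks) := by unfold Pre_hashkey; infer_instance
def pvWitness_hashkey : String × Int := ("ab", 7)

def Spec_hashkey (text : String) (num_chunks : Int) (out : Int) : Prop := out = hashkey_alt text num_chunks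
instance (text : String) (num_chunks : Int) (out : Int) : Decidable (Spec_hashkey text num_chunks out) := by unfold Spec_hashkey; infer_instance

-- ===== CLAIM (what is proved, stated in full; the proofs are below) =====
def Claim_equal_hashkey : Prop := ∀ (text : String) (num_chunks : Int), Dom_hashkey text num_chunks → Pre_hashkey text num_chunks → Spec_hashkey text num_chunks (hashkey text num_chunks)

-- ===== LEMMAS AND PROOFS =====

theorem pymod_eq_fmod (a b : Int) : PySem.Int.mod a b = Int.fmod a b := rfl

-- fmod y m is congruent to y mod m
theorem fmod_modeq (y m : Int) : Int.fmod y m ≡ y [ZMOD m] :=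
  Int.modEq_iff_dvd.mpr ⟨Int.fdiv y m, by rw [Int.fmod_def]; ring⟩

-- congruent integers have equal fmod
theorem fmod_congr {m a b : Int} (h : a ≡ b [ZMOD m]) : Int.fmod a m = Int.fmod b m := by
  obtain ⟨t, ht⟩ := Int.modEq_iff_dvd.mp h
  have hb : b = a + m * t := by omega
  rw [hb, Int.add_mul_fmod_self_left]

-- a nodup-dedup weighted sum equals the plain sum (counter correctness for a weighted sum)
theorem sum_count_dedup {K : Type} [BEq K] [LawfulBEq K] [DecidableEq K] (ks : List K) (f : K → Int) :
    ((PySem.Set.ofList ks).map (fun k => ((ks.count k : Nat) : Int) * f k)).sum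
      = (ks.map f).sum := by
  have h1 : (PySem.Set.ofList ks).toFinset = ks.toFinset := by
    apply Finset.ext; intro x; simp [PySem.Set.mem_ofList]
  have h2 := List.sum_toFinset (f := fun k => ((ks.count k : Nat) : Int) * f k)
      (PySem.Set.nodup_ofList ks)
  rw [← h2, h1, Finset.sum_list_map_count]
  apply Finset.sum_congr rfl
  intro x _
  rw [nsmul_eq_mul]
  congr 2
  unfold List.count
  apply List.countP_congr
  intro b _
  by_cases h : b = x <;> simp [h]

-- each B-side term is congruent to the corresponding A-side power term
theorem terms_modeq (m n : Int) (ps : List (Int × Char)) :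
    (ps.map (fun p => Int.fmod ((Int.fmod (n + p.1) m) ^ p.2.toNat) m)).sum
      ≡ (ps.map (fun p => (n + p.1) ^ p.2.toNat)).sum [ZMOD m] := by
  induction ps with
  | nil => rfl
  | cons p ps ih =>
      simp only [List.map_cons, List.sum_cons]
      exact Int.ModEq.add
        ((fmod_modeq _ m).trans (Int.ModEq.pow p.2.toNat (fmod_modeq (n + p.1) m))) ih

-- ===== VERDICT (by name: the statement is the Claim_ definition above) =====
theorem hashkey_spec : Claim_equal_hashkey := by
  intro text num_chunks _ _
  show hashkey text num_chunks = hashkey_alt text num_chunks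
  unfold hashkey hashkey_alt
  dsimp only
  set m := num_chunks with hm
  set L : Int := PySem.Str.len text with hL
  set es := PySem.List.enumerate text.toList 1 with hes
  -- split B's paired fold into the counter fold and the ord-total fold
  rw [PySem.List.foldl_prod_mk
        (f := fun (d : PySem.Dict (Int × Int) Int) (p : Int × Char) =>
          d.insert (PySem.Int.mod (L + p.1) m, (p.2.toNat : Int))
            (d.getD (PySem.Int.mod (L + p.1) m, (p.2.toNat : Int)) 0 + 1))
        (g := fun (t : Int) (p : Int × Char) => t + (p.2.toNat : Int))]
  -- the dict fold is the counter of the key list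
  have hkeys :
      es.foldl (fun (d : PySem.Dict (Int × Int) Int) (p : Int × Char) =>
          d.insert (PySem.Int.mod (L + p.1) m, (p.2.toNat : Int))
            (d.getD (PySem.Int.mod (L + p.1) m, (p.2.toNat : Int)) 0 + 1)) PySem.Dict.empty
        = PySem.Dict.counter (es.map (fun p => (PySem.Int.mod (L + p.1) m, (p.2.toNat : Int)))) := by
    rw [← PySem.Dict.foldl_insert_getD_add_one_eq_counter, List.foldl_map]
  rw [hkeys, PySem.List.foldl_add
        (g := fun (it : (Int × Int) × Int) => it.2 * PySem.Int.powMod it.1.1 it.1.2.toNat m),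
      PySem.Dict.items_counter, List.map_map,
      PySem.List.foldl_add (g := fun p : Int × Char => (p.2.toNat : Int))]
  · have hA : (fun (h : Int) (p : Int × Char) => h + (L + p.1) ^ p.2.toNat + (p.2.toNat : Int))
        = (fun (h : Int) (p : Int × Char) => h + ((L + p.1) ^ p.2.toNat + (p.2.toNat : Int))) := by
      funext h p; ring
    rw [hA, PySem.List.foldl_add
        (g := fun p : Int × Char => (L + p.1) ^ p.2.toNat + (p.2.toNat : Int))]
    simp only [Function.comp_def, zero_add]
    rw [sum_count_dedup (ks := es.map (fun p => (PySem.Int.mod (L + p.1) m, (p.2.toNat : Int))))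
          (f := fun k => PySem.Int.powMod k.1 k.2.toNat m), List.map_map]
    simp only [Function.comp_def, Int.toNat_natCast]
    rw [pymod_eq_fmod, pymod_eq_fmod]
    have hsplit :
        (es.map (fun p => (L + p.1) ^ p.2.toNat + (p.2.toNat : Int))).sum
          = (es.map (fun p => (L + p.1) ^ p.2.toNat)).sum
            + (es.map (fun p => (p.2.toNat : Int))).sum := by
      rw [PySem.List.sum_map_add_int]
    rw [hsplit]
    apply fmod_congr
    have hterm :
        (es.map (fun p => PySem.Int.powMod (PySem.Int.mod (L + p.1) m) p.2.toNat m))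
          = (es.map (fun p => Int.fmod ((Int.fmod (L + p.1) m) ^ p.2.toNat) m)) := by
      apply List.map_congr_left
      intro p _
      rw [PySem.Int.powMod_eq, pymod_eq_fmod, pymod_eq_fmod]
    rw [hterm]
    exact Int.ModEq.add_right _ (terms_modeq m L es).symm
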